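-- pv_equiv track=rewrite | github.com/Eilhwan/algorithms | oldOnes/algorithm/무제 폴더/xxmart.py | solution
-- ===== SOURCE A (Python) =====
-- def solution(id_list, k):
--     answer = 0
--     client = dict()
--     for ids in id_list:
--         ids = list(set(ids.split()))
--         for i in range(len(ids)):
--             if client.get(ids[i]) is None:
--                 client[ids[i]] = 1
--             else:
--                 client[ids[i]] = client[ids[i]] + 1
--     for value in client.values():
--         if value > k:
--             answer += k
--         else:
--             answer += value
--     return answer
-- ===== SOURCE B (Python) =====
-- def solution(id_list, k):
--     tokens = []
--     for ids in id_list: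
--         tokens.extend(set(ids.split()))
--     tokens = sorted(tokens)
--     answer = 0
--     i = 0
--     n = len(tokens)
--     while i < n:
--         j = i
--         while j < n and tokens[j] == tokens[i]:
--             j += 1
--         answer += min(j - i, k)
--         i = j
--     return answer
-- ===== Notes on version B (the rewrite author's own statement) =====
-- stated objective: alternative
-- what changed: Replaces A's hash-dict of per-token counts (built token by token, then summed over dict values) by flattening the per-row deduplicated tokens into one list, sorting it and scanning runs of consecutive equal tokens, adding min(run length, k) per run.
import Mathlib
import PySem

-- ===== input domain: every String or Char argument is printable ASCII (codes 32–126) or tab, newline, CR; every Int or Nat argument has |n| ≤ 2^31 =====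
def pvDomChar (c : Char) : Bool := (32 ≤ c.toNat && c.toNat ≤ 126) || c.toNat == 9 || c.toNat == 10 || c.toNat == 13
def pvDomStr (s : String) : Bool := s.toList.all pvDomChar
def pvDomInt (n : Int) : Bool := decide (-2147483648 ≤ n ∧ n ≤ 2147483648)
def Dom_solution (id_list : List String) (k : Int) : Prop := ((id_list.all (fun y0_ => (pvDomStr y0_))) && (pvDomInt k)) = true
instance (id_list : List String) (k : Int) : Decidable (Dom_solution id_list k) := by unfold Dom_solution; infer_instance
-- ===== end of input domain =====

-- B replaces A's dict of counts by flattening the per-row deduped tokens into one list,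
-- sorting it and scanning the runs of equal tokens, adding min(run length, k) per run (objective: alternative).

-- ===== PORT A =====
def solution (id_list : List String) (k : Int) : Int :=
  let client : PySem.Dict String Int :=
    id_list.foldl (fun client ids0 =>
      let ids : List String := PySem.Set.ofList (PySem.Str.split₀ ids0)
      (PySem.List.pyRange 0 (PySem.List.len ids) 1).foldl (fun d i =>
        match d.get? (PySem.List.pyGetD ids i "") with
        | none   => d.insert (PySem.List.pyGetD ids i "") 1
        | some v => d.insert (PySem.List.pyGetD ids i "") (v + 1)) client)
      PySem.Dict.empty
  client.values.foldl (fun answer value => if value > k then answer + k else answer + value) 0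

-- ===== PORT B =====
-- the scan of Source B: the inner while loop advances j over the run of tokens equal to tokens[i]
-- (here: takeWhile), adds min(run length, k), and resumes at j (here: dropWhile)
def pvGroupScan (ts : List String) (k : Int) : Int :=
  match ts with
  | [] => 0
  | x :: rest =>
      min (((rest.takeWhile (· == x)).length : Int) + 1) k + pvGroupScan (rest.dropWhile (· == x)) k
termination_by ts.length
decreasing_by
  have := List.length_dropWhile_le (· == x) rest
  simp; omega

def solution_alt (id_list : List String) (k : Int) : Int :=
  let tokens : List String :=
    id_list.foldl (fun acc ids => acc ++ (PySem.Set.ofList (PySem.Str.split₀ ids) : List String)) []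
  pvGroupScan (PySem.List.sorted tokens (fun x => x) false) k

-- ===== PRECONDITION & SPEC =====
def Spec_solution (id_list : List String) (k : Int) (out : Int) : Prop := out = solution_alt id_list k
instance (id_list : List String) (k : Int) (out : Int) : Decidable (Spec_solution id_list k out) := by unfold Spec_solution; infer_instance

-- ===== CLAIM (what is proved, stated in full; the proofs are below) =====
def Claim_equal_solution : Prop := ∀ (id_list : List String) (k : Int), Dom_solution id_list k → Spec_solution id_list k (solution id_list k)

-- ===== LEMMAS AND PROOFS =====

-- the flat multiset of per-row deduped tokens (proof-side only)
def pvTokens (id_list : List String) : List String :=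
  id_list.flatMap (fun s => (PySem.Set.ofList (PySem.Str.split₀ s) : List String))

-- the common value both programs compute: sum over the distinct tokens of min(count, k)
def pvCapSum (L : List String) (k : Int) : Int :=
  ((PySem.Set.ofList L).map (fun x => min ((L.count x : Int)) k)).sum

-- A computes pvCapSum of the flat token list
theorem pv_solution_eq_capSum (id_list : List String) (k : Int) :
    solution id_list k = pvCapSum (pvTokens id_list) k := by
  unfold solution
  have hstep : ∀ ids0 : List String, ∀ d : PySem.Dict String Int,
      ((PySem.List.pyRange 0 (PySem.List.len ids0) 1).foldl (fun d i =>
        match d.get? (PySem.List.pyGetD ids0 i "") with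
        | none   => d.insert (PySem.List.pyGetD ids0 i "") 1
        | some v => d.insert (PySem.List.pyGetD ids0 i "") (v + 1)) d)
      = ids0.foldl (fun d x => d.insert x (d.getD x 0 + 1)) d := by
    intro ids0 d
    rw [PySem.List.foldl_pyRange_pyGetD (xs := ids0) (d := "")
      (f := fun d x => match d.get? x with
        | none   => d.insert x 1
        | some v => d.insert x (v + 1)) (a := 0) (init := d) le_rfl]
    simp only [Int.toNat_zero, List.drop_zero]
    congr 1
    funext d x
    cases h : d.get? x with
    | none => simp [PySem.Dict.getD_eq_get?_getD, h]
    | some v => simp [PySem.Dict.getD_eq_get?_getD, h]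
  simp only [hstep]
  rw [show (fun (client : PySem.Dict String Int) (ids0 : String) =>
        (PySem.Set.ofList (PySem.Str.split₀ ids0) : List String).foldl
          (fun d x => d.insert x (d.getD x 0 + 1)) client)
      = (fun (client : PySem.Dict String Int) (ids0 : String) =>
        ((fun s => (PySem.Set.ofList (PySem.Str.split₀ s) : List String)) ids0).foldl
          (fun d x => d.insert x (d.getD x 0 + 1)) client) from rfl]
  rw [← List.foldl_flatMap]
  rw [PySem.Dict.foldl_insert_getD_add_one_eq_counter]
  have hvals : (PySem.Dict.counter (pvTokens id_list)).values
      = (PySem.Set.ofList (pvTokens id_list)).map (fun x => ((pvTokens id_list).count x : Int)) := by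
    simp only [PySem.Dict.values, PySem.Dict.items_counter, List.map_map]
    rfl
  rw [show (pvTokens id_list) = id_list.flatMap (fun s => (PySem.Set.ofList (PySem.Str.split₀ s) : List String)) from rfl] at hvals ⊢
  rw [hvals]
  have hite : (fun (answer value : Int) => if value > k then answer + k else answer + value)
      = (fun answer value => answer + min value k) := by
    funext a v; split_ifs <;> omega
  rw [hite, PySem.List.foldl_add]
  simp only [pvCapSum, List.map_map, zero_add]
  rfl

-- the run scan on a ≤-sorted list computes pvCapSum
theorem pv_groupScan_sorted (n : Nat) : ∀ (S : List String) (k : Int), S.length ≤ n →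
    S.Pairwise (· ≤ ·) → pvGroupScan S k = pvCapSum S k := by
  induction n with
  | zero =>
      intro S k hlen _
      have : S = [] := List.eq_nil_of_length_eq_zero (Nat.le_zero.mp hlen)
      subst this
      simp [pvGroupScan, pvCapSum, PySem.Set.ofList_nil]
  | succ n ih =>
      intro S k hlen hp
      cases S with
      | nil => simp [pvGroupScan, pvCapSum, PySem.Set.ofList_nil]
      | cons x rest =>
        set tw := rest.takeWhile (· == x) with htw_def
        set dw := rest.dropWhile (· == x) with hdw_def
        have hsplit : tw ++ dw = rest := List.takeWhile_append_dropWhile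
        have htw : ∀ y ∈ tw, y = x := by
          intro y hy
          rw [htw_def] at hy
          have h' := List.mem_takeWhile_imp hy
          exact eq_of_beq h'
        have hrest_pw : rest.Pairwise (· ≤ ·) := (List.pairwise_cons.mp hp).2
        have hdw_sub : dw.Sublist rest := List.dropWhile_sublist _
        have hdw_pw : dw.Pairwise (· ≤ ·) := hrest_pw.sublist hdw_sub
        have hxle : ∀ y ∈ rest, x ≤ y := (List.pairwise_cons.mp hp).1
        have hxdw : x ∉ dw := by
          intro hx
          cases hdw : dw with
          | nil => rw [hdw] at hx; exact absurd hx (List.not_mem_nil)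
          | cons b t =>
            have hb : ¬ ((b == x) = true) := by
              have := List.head?_dropWhile_not (· == x) rest
              rw [← hdw_def, hdw] at this; simpa using this
            have hbne : b ≠ x := fun h => hb (by simp [h])
            rw [hdw] at hx
            rcases List.mem_cons.mp hx with h | h
            · exact hbne h.symm
            · have hble : b ≤ x := by
                rw [hdw] at hdw_pw
                exact (List.pairwise_cons.mp hdw_pw).1 x h
              have hbmem : b ∈ rest := hdw_sub.mem (by rw [hdw]; exact List.mem_cons_self)
              exact hbne (le_antisymm hble (hxle b hbmem))
        have hctw : tw.count x = tw.length := List.count_eq_length.mpr (fun b hb => (htw b hb).symm)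
        have hcdw0 : dw.count x = 0 := List.count_eq_zero.mpr hxdw
        have hcx : (x :: rest).count x = tw.length + 1 := by
          rw [List.count_cons_self, ← hsplit, List.count_append, hctw, hcdw0]
        have hcy : ∀ y ∈ dw, (x :: rest).count y = dw.count y := by
          intro y hy
          have hyx : y ≠ x := fun h => hxdw (h ▸ hy)
          have hcytw : tw.count y = 0 :=
            List.count_eq_zero.mpr (fun hmem => hyx (htw y hmem))
          have h1 : List.count y (x :: rest) = List.count y rest := by
            simp [Ne.symm hyx]
          rw [h1, ← hsplit, List.count_append, hcytw]
          simp
        have hnodup_cons : (x :: (PySem.Set.ofList dw : List String)).Nodup := by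
          refine List.nodup_cons.mpr ⟨?_, PySem.Set.nodup_ofList dw⟩
          intro hx
          exact hxdw ((PySem.Set.mem_ofList dw x).mp hx)
        have hperm : (PySem.Set.ofList (x :: rest) : List String).Perm
            (x :: (PySem.Set.ofList dw : List String)) := by
          refine (List.perm_ext_iff_of_nodup (PySem.Set.nodup_ofList _) hnodup_cons).mpr ?_
          intro y
          simp only [PySem.Set.mem_ofList, List.mem_cons]
          constructor
          · rintro (h | h)
            · exact Or.inl h
            · rw [← hsplit] at h
              rcases List.mem_append.mp h with h | h
              · exact Or.inl (htw y h)
              · exact Or.inr h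
          · rintro (h | h)
            · exact Or.inl h
            · refine Or.inr ?_
              rw [← hsplit]
              exact List.mem_append.mpr (Or.inr h)
        have hlen' : dw.length ≤ n := by
          have h1 : dw.length ≤ rest.length := hdw_sub.length_le
          simp only [List.length_cons] at hlen
          omega
        have hih := ih dw k hlen' hdw_pw
        have hmapcongr :
            ((PySem.Set.ofList dw : List String).map (fun y => min (((x :: rest).count y : Int)) k))
            = ((PySem.Set.ofList dw : List String).map (fun y => min ((dw.count y : Int)) k)) := by
          refine List.map_congr_left ?_
          intro y hy
          rw [hcy y ((PySem.Set.mem_ofList dw y).mp hy)]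
        rw [pvGroupScan]
        rw [hih]
        unfold pvCapSum
        rw [(hperm.map (fun x_1 => min (((x :: rest).count x_1 : Int)) k)).sum_eq]
        rw [List.map_cons, List.sum_cons, hcx, hmapcongr, ← htw_def]
        push_cast
        ring
-- B computes pvCapSum of the flat token list
theorem pv_solution_alt_eq_capSum (id_list : List String) (k : Int) :
    solution_alt id_list k = pvCapSum (pvTokens id_list) k := by
  unfold solution_alt
  rw [PySem.List.foldl_append_eq_flatMap, List.nil_append]
  set L := pvTokens id_list with hL
  rw [show id_list.flatMap (fun ids => (PySem.Set.ofList (PySem.Str.split₀ ids) : List String)) = L from rfl]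
  set S := PySem.List.sorted L (fun x => x) false with hS
  have hperm : S.Perm L := PySem.List.sorted_perm L (fun x => x) false
  have hpw : S.Pairwise (· ≤ ·) := PySem.List.sorted_pairwise L (fun x => x)
  rw [pv_groupScan_sorted S.length S k le_rfl hpw]
  unfold pvCapSum
  have hsetperm : (PySem.Set.ofList S : List String).Perm (PySem.Set.ofList L : List String) := by
    refine (List.perm_ext_iff_of_nodup (PySem.Set.nodup_ofList _) (PySem.Set.nodup_ofList _)).mpr ?_
    intro y
    simp only [PySem.Set.mem_ofList]
    exact ⟨fun h => hperm.mem_iff.mp h, fun h => hperm.mem_iff.mpr h⟩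
  have hcount : ∀ y, S.count y = L.count y := fun y => hperm.count_eq y
  have hmap : ((PySem.Set.ofList S : List String).map (fun x => min ((S.count x : Int)) k))
      = ((PySem.Set.ofList S : List String).map (fun x => min ((L.count x : Int)) k)) := by
    refine List.map_congr_left ?_
    intro y _
    rw [hcount y]
  rw [hmap, (hsetperm.map (fun x => min ((L.count x : Int)) k)).sum_eq]

-- ===== VERDICT (by name: the statement is the Claim_ definition above) =====
theorem solution_spec : Claim_equal_solution := by
  intro id_list k _
  unfold Spec_solution
  rw [pv_solution_eq_capSum, pv_solution_alt_eq_capSum]
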